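-- pv_equiv track=rewrite | github.com/summer1029/Programmers | 프로그래머스/unrated/120903. 배열의 유사도/배열의 유사도.py | solution
-- ===== SOURCE A (Python) =====
-- def solution(s1, s2):
--     same = 0
--     if(len(s1) >= 1 and len(s1) <= 100 and len(s2) >= 1 and len(s2) <= 100) :
--         for i in range(len(s1)) :
--             for j in range(len(s2)) :
--                 if (len(s1[i]) >= 1 and len(s1[i]) <= 10 and len(s2[j]) >= 1 and len(s2[j]) <= 10 and s1[i] == s2[j]) :
--                     same = same + 1
--     return same
-- ===== SOURCE B (Python) =====
-- def solution(s1, s2):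
--     if not (1 <= len(s1) <= 100 and 1 <= len(s2) <= 100):
--         return 0
--     c2 = {}
--     for y in s2:
--         if 1 <= len(y) <= 10:
--             c2[y] = c2.get(y, 0) + 1
--     total = 0
--     for x in s1:
--         if 1 <= len(x) <= 10:
--             total += c2.get(x, 0)
--     return total
-- ===== Notes on version B (the rewrite author's own statement) =====
-- stated objective: alternative
-- what changed: Replaced A's nested all-pairs index scan over s1 x s2 with building a frequency dictionary of the valid strings of s2 and summing one dictionary lookup per valid element of s1; the 1..100 size guard caps input sizes, so no speed difference is measurable.
import Mathlib
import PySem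

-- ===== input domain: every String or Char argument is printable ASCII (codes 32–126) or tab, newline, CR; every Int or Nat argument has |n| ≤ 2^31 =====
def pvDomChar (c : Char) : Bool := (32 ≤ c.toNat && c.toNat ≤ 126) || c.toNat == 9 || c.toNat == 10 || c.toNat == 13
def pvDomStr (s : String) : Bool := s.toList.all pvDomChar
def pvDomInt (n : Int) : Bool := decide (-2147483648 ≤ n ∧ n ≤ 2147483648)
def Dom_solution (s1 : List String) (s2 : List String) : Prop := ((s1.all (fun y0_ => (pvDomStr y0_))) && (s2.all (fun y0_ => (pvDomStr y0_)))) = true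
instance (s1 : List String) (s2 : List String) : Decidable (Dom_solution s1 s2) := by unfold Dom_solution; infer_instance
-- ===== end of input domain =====

-- B replaces A's nested all-pairs index scan with a frequency dictionary built over s2 and a single lookup pass over s1 (objective: alternative algorithm).


-- ===== PORT A =====
def solution (s1 : List String) (s2 : List String) : Int :=
  let same : Int := 0
  if (s1.length : Int) ≥ 1 ∧ (s1.length : Int) ≤ 100 ∧ (s2.length : Int) ≥ 1 ∧ (s2.length : Int) ≤ 100 then
    (PySem.List.pyRange 0 (s1.length : Int) 1).foldl (fun same i =>
      (PySem.List.pyRange 0 (s2.length : Int) 1).foldl (fun same j =>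
        if (PySem.Str.len (PySem.List.pyGetD s1 i "") : Int) ≥ 1 ∧
           (PySem.Str.len (PySem.List.pyGetD s1 i "") : Int) ≤ 10 ∧
           (PySem.Str.len (PySem.List.pyGetD s2 j "") : Int) ≥ 1 ∧
           (PySem.Str.len (PySem.List.pyGetD s2 j "") : Int) ≤ 10 ∧
           PySem.List.pyGetD s1 i "" = PySem.List.pyGetD s2 j ""
        then same + 1 else same) same) same
  else same

-- ===== PORT B =====
def solution_alt (s1 : List String) (s2 : List String) : Int :=
  if ¬ (1 ≤ (s1.length : Int) ∧ (s1.length : Int) ≤ 100 ∧ 1 ≤ (s2.length : Int) ∧ (s2.length : Int) ≤ 100) then 0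
  else
    let c2 : PySem.Dict String Int :=
      s2.foldl (fun d y =>
        if 1 ≤ (PySem.Str.len y : Int) ∧ (PySem.Str.len y : Int) ≤ 10 then
          d.insert y (d.getD y 0 + 1)
        else d) PySem.Dict.empty
    s1.foldl (fun total x =>
      if 1 ≤ (PySem.Str.len x : Int) ∧ (PySem.Str.len x : Int) ≤ 10 then
        total + c2.getD x 0
      else total) 0

-- ===== PRECONDITION & SPEC =====
def Spec_solution (s1 : List String) (s2 : List String) (out : Int) : Prop := out = solution_alt s1 s2
instance (s1 : List String) (s2 : List String) (out : Int) : Decidable (Spec_solution s1 s2 out) := by unfold Spec_solution; infer_instance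

-- ===== CLAIM (what is proved, stated in full; the proofs are below) =====
def Claim_equal_solution : Prop := ∀ (s1 : List String) (s2 : List String), Dom_solution s1 s2 → Spec_solution s1 s2 (solution s1 s2)

-- ===== LEMMAS AND PROOFS =====

-- B's dictionary loop: at key x it accumulates the number of valid occurrences of x
lemma c2_getD (s2 : List String) (x : String) (d : PySem.Dict String Int) :
    (s2.foldl (fun d y =>
        if 1 ≤ (PySem.Str.len y : Int) ∧ (PySem.Str.len y : Int) ≤ 10 then
          d.insert y (d.getD y 0 + 1)
        else d) d).getD x 0
      = d.getD x 0
        + (s2.countP (fun y => decide (1 ≤ (PySem.Str.len y : Int) ∧ (PySem.Str.len y : Int) ≤ 10) && (y == x)) : Int) := by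
  induction s2 generalizing d with
  | nil => simp
  | cons y t ih =>
    simp only [List.foldl_cons, List.countP_cons]
    by_cases hy : 1 ≤ (PySem.Str.len y : Int) ∧ (PySem.Str.len y : Int) ≤ 10
    · rw [if_pos hy, ih, PySem.Dict.getD_insert]
      have h1 : 1 ≤ y.length := by simpa [PySem.Str.len_eq] using hy.1
      have h2 : y.length ≤ 10 := by exact_mod_cast (PySem.Str.len_eq y ▸ hy.2)
      by_cases hxy : x = y
      · simp [hxy, h1, h2]
        ring
      · have hne : (y == x) = false := by simp [Ne.symm hxy]
        simp [hxy, hne, h1, h2]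
    · rw [if_neg hy, ih]
      simp only [PySem.Str.len_eq] at hy
      have : ¬ (1 ≤ y.length ∧ y.length ≤ 10) := by
        intro h; exact hy ⟨by exact_mod_cast h.1, by exact_mod_cast h.2⟩
      simp [this]

-- A's inner loop over s2, for the fixed element x of s1
lemma inner_eq (x : String) (s2 : List String) (acc : Int) :
    s2.foldl (fun same y =>
        if (PySem.Str.len x : Int) ≥ 1 ∧ (PySem.Str.len x : Int) ≤ 10 ∧
           (PySem.Str.len y : Int) ≥ 1 ∧ (PySem.Str.len y : Int) ≤ 10 ∧ x = y
        then same + 1 else same) acc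
      = acc + (if 1 ≤ (PySem.Str.len x : Int) ∧ (PySem.Str.len x : Int) ≤ 10
               then (s2.countP (fun y => decide (1 ≤ (PySem.Str.len y : Int) ∧ (PySem.Str.len y : Int) ≤ 10) && (y == x)) : Int)
               else 0) := by
  induction s2 generalizing acc with
  | nil => simp
  | cons y t ih =>
    simp only [List.foldl_cons, ih, List.countP_cons]
    by_cases hx : 1 ≤ (PySem.Str.len x : Int) ∧ (PySem.Str.len x : Int) ≤ 10
    · have hx1 : 1 ≤ x.length := by simpa [PySem.Str.len_eq] using hx.1
      have hx2 : x.length ≤ 10 := by exact_mod_cast (PySem.Str.len_eq x ▸ hx.2)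
      by_cases hxy : x = y
      · subst hxy
        rw [if_pos ⟨hx.1, hx.2, hx.1, hx.2, rfl⟩]
        simp [hx1, hx2]
        ring
      · have hne : (y == x) = false := by simp [Ne.symm hxy]
        rw [if_neg (by rintro ⟨-, -, -, -, h⟩; exact hxy h)]
        simp [hx1, hx2, hne]
    · rw [if_neg (by rintro ⟨h1, h2, -⟩; exact hx ⟨h1, h2⟩), if_neg hx, if_neg hx]

-- the two passes over s1 agree, step by step
lemma outer_eq (s1 s2 : List String) (acc : Int) :
    s1.foldl (fun same x =>
      s2.foldl (fun same y =>
        if (PySem.Str.len x : Int) ≥ 1 ∧ (PySem.Str.len x : Int) ≤ 10 ∧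
           (PySem.Str.len y : Int) ≥ 1 ∧ (PySem.Str.len y : Int) ≤ 10 ∧ x = y
        then same + 1 else same) same) acc
    = s1.foldl (fun total x =>
        if 1 ≤ (PySem.Str.len x : Int) ∧ (PySem.Str.len x : Int) ≤ 10 then
          total + (s2.foldl (fun d y =>
            if 1 ≤ (PySem.Str.len y : Int) ∧ (PySem.Str.len y : Int) ≤ 10 then
              d.insert y (d.getD y 0 + 1)
            else d) PySem.Dict.empty).getD x 0
        else total) acc := by
  induction s1 generalizing acc with
  | nil => rfl
  | cons x t ih =>
    simp only [List.foldl_cons]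
    rw [inner_eq, c2_getD s2 x PySem.Dict.empty, PySem.Dict.getD_empty, ih]
    congr 1
    split_ifs <;> ring

-- ===== VERDICT (by name: the statement is the Claim_ definition above) =====
theorem solution_spec : Claim_equal_solution := by
  intro s1 s2 _
  show solution s1 s2 = solution_alt s1 s2
  unfold solution solution_alt
  by_cases hg : 1 ≤ (s1.length : Int) ∧ (s1.length : Int) ≤ 100 ∧ 1 ≤ (s2.length : Int) ∧ (s2.length : Int) ≤ 100
  · rw [if_pos hg, if_neg (not_not_intro hg)]
    rw [PySem.List.foldl_pyRange_zero_pyGetD' s1 ""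
        (fun same x =>
          (PySem.List.pyRange 0 (s2.length : Int) 1).foldl (fun same j =>
            if (PySem.Str.len x : Int) ≥ 1 ∧ (PySem.Str.len x : Int) ≤ 10 ∧
               (PySem.Str.len (PySem.List.pyGetD s2 j "") : Int) ≥ 1 ∧
               (PySem.Str.len (PySem.List.pyGetD s2 j "") : Int) ≤ 10 ∧
               x = PySem.List.pyGetD s2 j ""
            then same + 1 else same) same) 0]
    have hin : ∀ (x : String) (same : Int),
        (PySem.List.pyRange 0 (s2.length : Int) 1).foldl (fun same j =>
            if (PySem.Str.len x : Int) ≥ 1 ∧ (PySem.Str.len x : Int) ≤ 10 ∧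
               (PySem.Str.len (PySem.List.pyGetD s2 j "") : Int) ≥ 1 ∧
               (PySem.Str.len (PySem.List.pyGetD s2 j "") : Int) ≤ 10 ∧
               x = PySem.List.pyGetD s2 j ""
            then same + 1 else same) same
        = s2.foldl (fun same y =>
            if (PySem.Str.len x : Int) ≥ 1 ∧ (PySem.Str.len x : Int) ≤ 10 ∧
               (PySem.Str.len y : Int) ≥ 1 ∧ (PySem.Str.len y : Int) ≤ 10 ∧ x = y
            then same + 1 else same) same := by
      intro x same
      exact PySem.List.foldl_pyRange_zero_pyGetD' s2 ""
        (fun same y =>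
          if (PySem.Str.len x : Int) ≥ 1 ∧ (PySem.Str.len x : Int) ≤ 10 ∧
             (PySem.Str.len y : Int) ≥ 1 ∧ (PySem.Str.len y : Int) ≤ 10 ∧ x = y
          then same + 1 else same) same
    simp only [hin]
    exact outer_eq s1 s2 0
  · rw [if_neg (fun h => hg ⟨h.1, h.2.1, h.2.2.1, h.2.2.2⟩), if_pos (by tauto)]
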